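-- pv_equiv track=rewrite | github.com/lucylow/SkySimTacticalGG | backend/app/ml/features.py | _count_win_streak
-- ===== SOURCE A (Python) =====
-- from typing import Dict, List, Any
--
-- def _count_win_streak(rounds: List[Dict]) -> int:
--     """Count consecutive wins."""
--     streak = 0
--     for r in reversed(rounds):
--         if r.get("won", False):
--             streak += 1
--         else:
--             break
--     return streak
-- ===== SOURCE B (Python) =====
-- from typing import Dict, List, Any
--
-- def _count_win_streak(rounds: List[Dict]) -> int:
--     """Count consecutive wins (single forward pass with reset)."""
--     streak = 0
--     for r in rounds:
--         if r.get("won", False):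
--             streak += 1
--         else:
--             streak = 0
--     return streak
-- ===== Notes on version B (the rewrite author's own statement) =====
-- stated objective: alternative
-- what changed: Replaces the reversed-iteration with early break by a single forward pass that increments a counter on a win and resets it to 0 on a loss; the final counter value equals the trailing win streak.
import Mathlib
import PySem

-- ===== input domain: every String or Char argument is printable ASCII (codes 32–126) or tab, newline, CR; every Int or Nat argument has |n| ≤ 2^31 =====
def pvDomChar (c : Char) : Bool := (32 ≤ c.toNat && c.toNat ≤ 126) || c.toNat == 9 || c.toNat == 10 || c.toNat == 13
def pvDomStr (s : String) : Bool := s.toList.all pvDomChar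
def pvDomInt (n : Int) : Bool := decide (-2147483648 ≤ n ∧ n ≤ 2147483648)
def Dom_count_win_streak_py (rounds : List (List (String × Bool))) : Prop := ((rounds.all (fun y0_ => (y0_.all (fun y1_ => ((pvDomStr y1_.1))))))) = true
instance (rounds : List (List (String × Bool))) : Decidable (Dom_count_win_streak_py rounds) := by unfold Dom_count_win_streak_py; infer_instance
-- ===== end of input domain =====

-- B replaces A's reversed scan with early break by a forward pass that resets a counter on each loss (alternative decomposition).

-- ===== PORT A =====
-- A: iterate over reversed(rounds), increment streak on a win, break on the first loss.
def countWinStreakLoopA : List (List (String × Bool)) → Int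
  | [] => 0
  | r :: rest =>
    if PySem.Dict.getD (PySem.Dict.mk r) "won" false then 1 + countWinStreakLoopA rest else 0

def count_win_streak_py (rounds : List (List (String × Bool))) : Int :=
  countWinStreakLoopA rounds.reverse

-- ===== PORT B =====
-- B: one forward pass; streak += 1 on a win, streak = 0 on a loss.
def count_win_streak_py_alt (rounds : List (List (String × Bool))) : Int :=
  rounds.foldl (fun streak r => if PySem.Dict.getD (PySem.Dict.mk r) "won" false then streak + 1 else 0) 0

-- ===== PRECONDITION & SPEC =====
def Spec_count_win_streak_py (rounds : List (List (String × Bool))) (out : Int) : Prop := out = count_win_streak_py_alt rounds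
instance (rounds : List (List (String × Bool))) (out : Int) : Decidable (Spec_count_win_streak_py rounds out) := by unfold Spec_count_win_streak_py; infer_instance

-- ===== CLAIM (what is proved, stated in full; the proofs are below) =====
def Claim_equal_count_win_streak_py : Prop := ∀ (rounds : List (List (String × Bool))), Dom_count_win_streak_py rounds → Spec_count_win_streak_py rounds (count_win_streak_py rounds)

-- ===== LEMMAS AND PROOFS =====

theorem loopA_le_length (xs : List (List (String × Bool))) :
    countWinStreakLoopA xs ≤ (xs.length : Int) := by
  induction xs with
  | nil => simp [countWinStreakLoopA]
  | cons r rest ih =>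
    simp only [countWinStreakLoopA, List.length_cons]
    split <;> push_cast <;> omega

theorem loopA_append (xs ys : List (List (String × Bool))) :
    countWinStreakLoopA (xs ++ ys) =
      if countWinStreakLoopA xs = (xs.length : Int)
      then (xs.length : Int) + countWinStreakLoopA ys
      else countWinStreakLoopA xs := by
  induction xs with
  | nil => simp [countWinStreakLoopA]
  | cons r rest ih =>
    simp only [List.cons_append, countWinStreakLoopA, List.length_cons]
    have hle := loopA_le_length rest
    by_cases hw : PySem.Dict.getD (PySem.Dict.mk r) "won" false
    · rw [if_pos hw, if_pos hw, ih]
      by_cases hc : countWinStreakLoopA rest = (rest.length : Int)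
      · rw [if_pos hc, if_pos (by push_cast; omega)]
        push_cast; omega
      · rw [if_neg hc, if_neg (by push_cast; omega)]
    · rw [if_neg hw, if_neg hw, if_neg (by push_cast; omega)]

theorem foldl_eq_loopA_rev (l : List (List (String × Bool))) (s : Int) (hs : 0 ≤ s) :
    l.foldl (fun streak r => if PySem.Dict.getD (PySem.Dict.mk r) "won" false then streak + 1 else 0) s =
      if countWinStreakLoopA l.reverse = (l.length : Int)
      then s + (l.length : Int)
      else countWinStreakLoopA l.reverse := by
  induction l generalizing s with
  | nil => simp [countWinStreakLoopA]
  | cons r t ih =>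
    simp only [List.foldl_cons, List.reverse_cons, List.length_cons]
    rw [loopA_append]
    have hle := loopA_le_length t.reverse
    have hlen : (t.reverse.length : Int) = (t.length : Int) := by simp
    rw [hlen] at hle
    by_cases hw : PySem.Dict.getD (PySem.Dict.mk r) "won" false
    · rw [if_pos hw, ih (s + 1) (by omega)]
      simp only [countWinStreakLoopA, hw, if_true, hlen]
      split_ifs <;> omega
    · rw [if_neg hw, ih 0 le_rfl]
      simp only [countWinStreakLoopA, hw, hlen]
      split_ifs <;> first | omega | (exfalso; omega)

-- ===== VERDICT (by name: the statement is the Claim_ definition above) =====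
theorem count_win_streak_py_spec : Claim_equal_count_win_streak_py := by
  intro rounds _
  unfold Spec_count_win_streak_py count_win_streak_py count_win_streak_py_alt
  rw [foldl_eq_loopA_rev rounds 0 le_rfl]
  by_cases hc : countWinStreakLoopA rounds.reverse = (rounds.length : Int)
  · simp [hc]
  · simp [hc]
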